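-- pv_equiv track=rewrite | github.com/tridhapuku/pythonProject | DSA/Karumanchi/Chap2_RecursnBacktracking/BackTrackingProblems/NQuuenProblem.py | CheckDiagonalSum
-- ===== SOURCE A (Python) =====
-- def CheckDiagonalSum(bo, n):
--     for i in range(0, n):
--         j = sum1 = sum2 = sum3 = sum4 = 0
--         for k in range(0, n - i):
--             sum1 = sum1 + bo[i + k][j + k]
--             sum2 = sum2 + bo[j + k][i + k]
--             sum3 = sum3 + bo[n - 1 - i - k][j + k]
--             sum4 = sum4 + bo[n - 1 - k][i + k]
--
--         if sum1 > 1 or sum2 > 1 or sum3 > 1 or sum4 > 1: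
--             return False
--     return True
-- ===== SOURCE B (Python) =====
-- def CheckDiagonalSum(bo, n):
--     d1 = {}
--     d2 = {}
--     for r in range(n):
--         for c in range(n):
--             v = bo[r][c]
--             d1[r - c] = d1.get(r - c, 0) + v
--             d2[r + c] = d2.get(r + c, 0) + v
--     return all(s <= 1 for s in d1.values()) and all(s <= 1 for s in d2.values())
-- ===== Notes on version B (the rewrite author's own statement) =====
-- stated objective: idiomatic
-- what changed: Replaces the four per-offset diagonal-walking loops (with early return per offset) by one row-major pass that accumulates each cell into two dicts keyed by the diagonal numbers r-c and r+c, then checks that no bucket sum exceeds 1.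
-- outside the precondition, e.g. on CheckDiagonalSum([[9, 0, 9], [0, 9], [9, 0, 9]], 3): A returns False, B raises IndexError
import Mathlib
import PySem

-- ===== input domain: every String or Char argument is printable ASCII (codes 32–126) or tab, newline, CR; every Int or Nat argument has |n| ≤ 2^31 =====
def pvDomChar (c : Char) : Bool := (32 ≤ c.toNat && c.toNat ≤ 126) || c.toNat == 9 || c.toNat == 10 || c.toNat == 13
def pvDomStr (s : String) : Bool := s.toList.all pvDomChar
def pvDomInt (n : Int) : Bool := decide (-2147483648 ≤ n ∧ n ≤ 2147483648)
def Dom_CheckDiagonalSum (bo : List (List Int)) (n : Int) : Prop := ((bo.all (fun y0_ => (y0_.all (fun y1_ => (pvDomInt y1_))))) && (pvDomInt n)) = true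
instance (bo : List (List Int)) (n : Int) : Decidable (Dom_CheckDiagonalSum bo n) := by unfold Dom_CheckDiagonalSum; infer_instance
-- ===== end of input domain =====

-- B replaces A's four per-offset diagonal-walking loops by one row-major pass into two
-- dicts keyed by the diagonal numbers r-c and r+c (objective: idiomatic; same O(n^2) cost).

-- ===== PORT A =====
-- bo[r][c]; the defaults are only reached outside Pre_ (where the Python raises IndexError)
def pvCellA (bo : List (List Int)) (r c : Int) : Int :=
  PySem.List.pyGetD (PySem.List.pyGetD bo r []) c 0

-- the 'for i in range(0, n)' loop with its early 'return False'
def pvLoopA (bo : List (List Int)) (n : Int) : List Int → Bool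
  | [] => true
  | i :: rest =>
      -- j = sum1 = sum2 = sum3 = sum4 = 0, then 'for k in range(0, n - i)' (j stays 0)
      let s := (PySem.List.pyRange 0 (n - i) 1).foldl
        (fun (s : Int × Int × Int × Int) k =>
          (s.1 + pvCellA bo (i + k) (0 + k),
           s.2.1 + pvCellA bo (0 + k) (i + k),
           s.2.2.1 + pvCellA bo (n - 1 - i - k) (0 + k),
           s.2.2.2 + pvCellA bo (n - 1 - k) (i + k)))
        (0, 0, 0, 0)
      if s.1 > 1 || s.2.1 > 1 || s.2.2.1 > 1 || s.2.2.2 > 1 then false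
      else pvLoopA bo n rest

def CheckDiagonalSum (bo : List (List Int)) (n : Int) : Bool :=
  pvLoopA bo n (PySem.List.pyRange 0 n 1)

-- ===== PORT B =====
def pvCellB (bo : List (List Int)) (r c : Int) : Int :=
  PySem.List.pyGetD (PySem.List.pyGetD bo r []) c 0

def CheckDiagonalSum_alt (bo : List (List Int)) (n : Int) : Bool :=
  let d := (PySem.List.pyRange 0 n 1).foldl (fun s r =>
      (PySem.List.pyRange 0 n 1).foldl
        (fun (s : PySem.Dict Int Int × PySem.Dict Int Int) c =>
          let v := pvCellB bo r c
          (s.1.insert (r - c) (s.1.getD (r - c) 0 + v),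
           s.2.insert (r + c) (s.2.getD (r + c) 0 + v))) s)
    (PySem.Dict.empty, PySem.Dict.empty)
  d.1.values.all (fun s => s ≤ 1) && d.2.values.all (fun s => s ≤ 1)

-- ===== PRECONDITION & SPEC =====
-- Pre_ asks for a full n x n board (first n rows each of length ≥ n): that is exactly where
-- neither Python raises IndexError.  It excludes some ragged boards on which A happens to
-- return False before reaching a short row while B's row-major pass raises there.
def Pre_CheckDiagonalSum (bo : List (List Int)) (n : Int) : Prop :=
  n ≤ (bo.length : Int) ∧ ∀ row ∈ bo.take n.toNat, n ≤ (row.length : Int)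
instance (bo : List (List Int)) (n : Int) : Decidable (Pre_CheckDiagonalSum bo n) := by
  unfold Pre_CheckDiagonalSum; infer_instance

def pvWitness_CheckDiagonalSum : List (List Int) × Int := ([[1, 0], [0, 1]], 2)

def Spec_CheckDiagonalSum (bo : List (List Int)) (n : Int) (out : Bool) : Prop := out = CheckDiagonalSum_alt bo n
instance (bo : List (List Int)) (n : Int) (out : Bool) : Decidable (Spec_CheckDiagonalSum bo n out) := by unfold Spec_CheckDiagonalSum; infer_instance

-- ===== CLAIM (what is proved, stated in full; the proofs are below) =====
def Claim_equal_CheckDiagonalSum : Prop := ∀ (bo : List (List Int)) (n : Int), Dom_CheckDiagonalSum bo n → Pre_CheckDiagonalSum bo n → Spec_CheckDiagonalSum bo n (CheckDiagonalSum bo n)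

-- ===== LEMMAS AND PROOFS =====

-- shared spec layer: the cell list, per-diagonal bucket sums, and A's four slice sums
def pvPairs (n : Int) : List (Int × Int) :=
  (PySem.List.pyRange 0 n 1).flatMap (fun r => (PySem.List.pyRange 0 n 1).map (fun c => (r, c)))

def pvD1 (bo : List (List Int)) (n k : Int) : Int :=
  (((pvPairs n).filter (fun p => p.1 - p.2 == k)).map (fun p => pvCellA bo p.1 p.2)).sum

def pvS1 (bo : List (List Int)) (n i : Int) : Int :=
  ((PySem.List.pyRange 0 (n - i) 1).map (fun k => pvCellA bo (i + k) (0 + k))).sum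

def pvD2 (bo : List (List Int)) (n k : Int) : Int :=
  (((pvPairs n).filter (fun p => p.1 + p.2 == k)).map (fun p => pvCellA bo p.1 p.2)).sum

def pvS2 (bo : List (List Int)) (n i : Int) : Int :=
  ((PySem.List.pyRange 0 (n - i) 1).map (fun k => pvCellA bo (0 + k) (i + k))).sum

def pvS3 (bo : List (List Int)) (n i : Int) : Int :=
  ((PySem.List.pyRange 0 (n - i) 1).map (fun k => pvCellA bo (n - 1 - i - k) (0 + k))).sum

def pvS4 (bo : List (List Int)) (n i : Int) : Int :=
  ((PySem.List.pyRange 0 (n - i) 1).map (fun k => pvCellA bo (n - 1 - k) (i + k))).sum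
def pvFold1 (bo : List (List Int)) (n : Int) : PySem.Dict Int Int :=
  (pvPairs n).foldl (fun d p => d.insert (p.1 - p.2) (d.getD (p.1 - p.2) 0 + pvCellB bo p.1 p.2))
    PySem.Dict.empty

def pvFold2 (bo : List (List Int)) (n : Int) : PySem.Dict Int Int :=
  (pvPairs n).foldl (fun d p => d.insert (p.1 + p.2) (d.getD (p.1 + p.2) 0 + pvCellB bo p.1 p.2))
    PySem.Dict.empty

-- A side
theorem pvFoldA (bo : List (List Int)) (n i : Int) :
    (PySem.List.pyRange 0 (n - i) 1).foldl
        (fun (s : Int × Int × Int × Int) k =>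
          (s.1 + pvCellA bo (i + k) (0 + k),
           s.2.1 + pvCellA bo (0 + k) (i + k),
           s.2.2.1 + pvCellA bo (n - 1 - i - k) (0 + k),
           s.2.2.2 + pvCellA bo (n - 1 - k) (i + k)))
        (0, 0, 0, 0) = (pvS1 bo n i, pvS2 bo n i, pvS3 bo n i, pvS4 bo n i) := by
  rw [PySem.List.foldl_prod_mk (f := fun s1 k => s1 + pvCellA bo (i + k) (0 + k))
      (g := fun (s : Int × Int × Int) k =>
          (s.1 + pvCellA bo (0 + k) (i + k),
           s.2.1 + pvCellA bo (n - 1 - i - k) (0 + k),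
           s.2.2 + pvCellA bo (n - 1 - k) (i + k)))]
  rw [PySem.List.foldl_prod_mk (f := fun s2 k => s2 + pvCellA bo (0 + k) (i + k))
      (g := fun (s : Int × Int) k =>
          (s.1 + pvCellA bo (n - 1 - i - k) (0 + k),
           s.2 + pvCellA bo (n - 1 - k) (i + k)))]
  rw [PySem.List.foldl_prod_mk (f := fun s3 k => s3 + pvCellA bo (n - 1 - i - k) (0 + k))
      (g := fun (s4 : Int) k => s4 + pvCellA bo (n - 1 - k) (i + k))]
  simp [PySem.List.foldl_add, pvS1, pvS2, pvS3, pvS4]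

theorem pvLoopA_eq_all (bo : List (List Int)) (n : Int) (l : List Int) :
    pvLoopA bo n l = l.all (fun i =>
      !(pvS1 bo n i > 1 || pvS2 bo n i > 1 || pvS3 bo n i > 1 || pvS4 bo n i > 1)) := by
  induction l with
  | nil => rfl
  | cons i rest ih =>
      rw [List.all_cons]
      simp only [pvLoopA, pvFoldA bo n i, ih]
      by_cases h : (pvS1 bo n i > 1 || pvS2 bo n i > 1 || pvS3 bo n i > 1 || pvS4 bo n i > 1) = true
      · simp [h]
      · rw [if_neg (by simpa using h)]
        simp at h
        simp [h]

-- B side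
theorem pvGetD_foldl_insert_add {ι : Type} (key : ι → Int) (f : ι → Int)
    (l : List ι) (d : PySem.Dict Int Int) (k : Int) :
    (l.foldl (fun d a => d.insert (key a) (d.getD (key a) 0 + f a)) d).getD k 0
      = d.getD k 0 + ((l.filter (fun a => key a == k)).map f).sum := by
  induction l generalizing d with
  | nil => simp
  | cons a l ih =>
      simp only [List.foldl_cons, List.filter_cons, ih]
      rw [PySem.Dict.getD_insert]
      by_cases hk : key a = k
      · simp [hk]; ring
      · simp [hk, Ne.symm hk]

theorem pvAltSplit (bo : List (List Int)) (n : Int) (l : List Int)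
    (d1 d2 : PySem.Dict Int Int) :
    l.foldl (fun s r =>
      (PySem.List.pyRange 0 n 1).foldl
        (fun (s : PySem.Dict Int Int × PySem.Dict Int Int) c =>
          let v := pvCellB bo r c
          (s.1.insert (r - c) (s.1.getD (r - c) 0 + v),
           s.2.insert (r + c) (s.2.getD (r + c) 0 + v))) s) (d1, d2)
    = (l.foldl (fun d r => (PySem.List.pyRange 0 n 1).foldl
          (fun (d : PySem.Dict Int Int) c => d.insert (r - c) (d.getD (r - c) 0 + pvCellB bo r c)) d) d1,
       l.foldl (fun d r => (PySem.List.pyRange 0 n 1).foldl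
          (fun (d : PySem.Dict Int Int) c => d.insert (r + c) (d.getD (r + c) 0 + pvCellB bo r c)) d) d2) := by
  induction l generalizing d1 d2 with
  | nil => rfl
  | cons r l ih =>
      simp only [List.foldl_cons]
      rw [PySem.List.foldl_prod_mk
        (f := fun (d : PySem.Dict Int Int) c => d.insert (r - c) (d.getD (r - c) 0 + pvCellB bo r c))
        (g := fun (d : PySem.Dict Int Int) c => d.insert (r + c) (d.getD (r + c) 0 + pvCellB bo r c))]
      exact ih _ _

theorem pvNestedEqPairs {β : Type} (n : Int) (g : β → Int × Int → β) (init : β) :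
    (PySem.List.pyRange 0 n 1).foldl
        (fun b r => (PySem.List.pyRange 0 n 1).foldl (fun b c => g b (r, c)) b) init
      = (pvPairs n).foldl g init := by
  rw [pvPairs, List.foldl_flatMap]
  simp [List.foldl_map]

theorem pvFold1_getD (bo : List (List Int)) (n k : Int) :
    (pvFold1 bo n).getD k 0 = pvD1 bo n k := by
  have h := pvGetD_foldl_insert_add (fun p : Int × Int => p.1 - p.2)
    (fun p => pvCellB bo p.1 p.2) (pvPairs n) PySem.Dict.empty k
  simpa [pvFold1, pvD1, pvCellA, pvCellB] using h

theorem pvFold2_getD (bo : List (List Int)) (n k : Int) :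
    (pvFold2 bo n).getD k 0 = pvD2 bo n k := by
  have h := pvGetD_foldl_insert_add (fun p : Int × Int => p.1 + p.2)
    (fun p => pvCellB bo p.1 p.2) (pvPairs n) PySem.Dict.empty k
  simpa [pvFold2, pvD2, pvCellA, pvCellB] using h

theorem pvFold1_nodup (bo : List (List Int)) (n : Int) : (pvFold1 bo n).keys.Nodup := by
  have h := PySem.Dict.nodup_keys_foldl_insert_key (pvPairs n) (fun p : Int × Int => p.1 - p.2)
    (fun (d : PySem.Dict Int Int) p => d.getD (p.1 - p.2) 0 + pvCellB bo p.1 p.2)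
    PySem.Dict.empty (by simp)
  simpa [pvFold1] using h

theorem pvFold2_nodup (bo : List (List Int)) (n : Int) : (pvFold2 bo n).keys.Nodup := by
  have h := PySem.Dict.nodup_keys_foldl_insert_key (pvPairs n) (fun p : Int × Int => p.1 + p.2)
    (fun (d : PySem.Dict Int Int) p => d.getD (p.1 + p.2) 0 + pvCellB bo p.1 p.2)
    PySem.Dict.empty (by simp)
  simpa [pvFold2] using h

theorem pvFold1_keys (bo : List (List Int)) (n : Int) :
    (pvFold1 bo n).keys = PySem.Set.ofList ((pvPairs n).map (fun p => p.1 - p.2)) := by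
  have h := PySem.Dict.keys_foldl_insert_key (l := pvPairs n) (key := fun p : Int × Int => p.1 - p.2)
    (f := fun (d : PySem.Dict Int Int) p => d.getD (p.1 - p.2) 0 + pvCellB bo p.1 p.2)
    (d := PySem.Dict.empty)
  simpa [pvFold1, PySem.Set.update_nil_left] using h

theorem pvFold2_keys (bo : List (List Int)) (n : Int) :
    (pvFold2 bo n).keys = PySem.Set.ofList ((pvPairs n).map (fun p => p.1 + p.2)) := by
  have h := PySem.Dict.keys_foldl_insert_key (l := pvPairs n) (key := fun p : Int × Int => p.1 + p.2)
    (f := fun (d : PySem.Dict Int Int) p => d.getD (p.1 + p.2) 0 + pvCellB bo p.1 p.2)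
    (d := PySem.Dict.empty)
  simpa [pvFold2, PySem.Set.update_nil_left] using h

theorem pvAlt_eq (bo : List (List Int)) (n : Int) :
    CheckDiagonalSum_alt bo n =
      ((pvFold1 bo n).values.all (fun s => s ≤ 1) && (pvFold2 bo n).values.all (fun s => s ≤ 1)) := by
  have h1 := pvNestedEqPairs (n := n)
    (g := fun (d : PySem.Dict Int Int) p => d.insert (p.1 - p.2) (d.getD (p.1 - p.2) 0 + pvCellB bo p.1 p.2))
    (init := PySem.Dict.empty)
  have h2 := pvNestedEqPairs (n := n)
    (g := fun (d : PySem.Dict Int Int) p => d.insert (p.1 + p.2) (d.getD (p.1 + p.2) 0 + pvCellB bo p.1 p.2))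
    (init := PySem.Dict.empty)
  unfold CheckDiagonalSum_alt pvFold1 pvFold2
  rw [pvAltSplit]
  simp only [] at h1 h2 ⊢
  rw [h1, h2]

theorem B_eq_all (bo : List (List Int)) (n : Int) :
    CheckDiagonalSum_alt bo n = true ↔
      (∀ k ∈ (pvPairs n).map (fun p => p.1 - p.2), pvD1 bo n k ≤ 1) ∧
      (∀ k ∈ (pvPairs n).map (fun p => p.1 + p.2), pvD2 bo n k ≤ 1) := by
  rw [pvAlt_eq,
    PySem.Dict.values_eq_map_keys _ (pvFold1_nodup bo n) 0,
    PySem.Dict.values_eq_map_keys _ (pvFold2_nodup bo n) 0,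
    pvFold1_keys, pvFold2_keys]
  simp only [List.all_map, List.all_eq_true, Function.comp, pvFold1_getD, pvFold2_getD,
    Bool.and_eq_true, decide_eq_true_eq]
  constructor
  · rintro ⟨h1, h2⟩
    exact ⟨fun k hk => h1 k (by simpa [PySem.Set.mem_ofList] using hk),
           fun k hk => h2 k (by simpa [PySem.Set.mem_ofList] using hk)⟩
  · rintro ⟨h1, h2⟩
    exact ⟨fun k hk => h1 k (by simpa [PySem.Set.mem_ofList] using hk),
           fun k hk => h2 k (by simpa [PySem.Set.mem_ofList] using hk)⟩

-- bridges between the two shapes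
theorem pvRowFilter (n t : Int) :
    ((PySem.List.pyRange 0 n 1).filter (fun c => c == t)) =
      if 0 ≤ t ∧ t < n then [t] else [] := by
  rw [List.filter_beq]
  by_cases h : 0 ≤ t ∧ t < n
  · rw [List.count_eq_one_of_mem (PySem.List.nodup_pyRange_one 0 n)
      (PySem.List.mem_pyRange_one.mpr h)]
    simp [h]
  · rw [List.count_eq_zero.mpr (fun hm => h (PySem.List.mem_pyRange_one.mp hm))]
    simp [h]

theorem pvD1_eq (bo : List (List Int)) (n k : Int) :
    pvD1 bo n k = ((PySem.List.pyRange 0 n 1).map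
      (fun r => if 0 ≤ r - k ∧ r - k < n then pvCellA bo r (r - k) else 0)).sum := by
  unfold pvD1 pvPairs
  rw [List.filter_flatMap, List.map_flatMap, List.flatMap_def, List.sum_flatten, List.map_map]
  congr 1
  apply List.map_congr_left
  intro r _hr
  simp only [Function.comp]
  rw [List.filter_map]
  rw [List.filter_congr (q := fun c => c == r - k)
      (by intro c _; by_cases h : c = r - k <;> simp [h] <;> omega)]
  rw [pvRowFilter n (r - k)]
  by_cases h : 0 ≤ r - k ∧ r - k < n
  · rw [if_pos h, if_pos h]; simp
  · rw [if_neg h, if_neg h]; simp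

theorem pvD2_eq (bo : List (List Int)) (n k : Int) :
    pvD2 bo n k = ((PySem.List.pyRange 0 n 1).map
      (fun r => if 0 ≤ k - r ∧ k - r < n then pvCellA bo r (k - r) else 0)).sum := by
  unfold pvD2 pvPairs
  rw [List.filter_flatMap, List.map_flatMap, List.flatMap_def, List.sum_flatten, List.map_map]
  congr 1
  apply List.map_congr_left
  intro r _hr
  simp only [Function.comp]
  rw [List.filter_map]
  rw [List.filter_congr (q := fun c => c == k - r)
      (by intro c _; by_cases h : c = k - r <;> simp [h] <;> omega)]
  rw [pvRowFilter n (k - r)]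
  by_cases h : 0 ≤ k - r ∧ k - r < n
  · rw [if_pos h, if_pos h]; simp
  · rw [if_neg h, if_neg h]; simp

theorem pvCell_congr (bo : List (List Int)) {a b c d : Int} (h1 : a = c) (h2 : b = d) :
    pvCellA bo a b = pvCellA bo c d := by rw [h1, h2]

theorem pvSumReflect (m : Nat) (f : Nat → Int) :
    ((List.range m).map f).sum = ((List.range m).map (fun t => f (m - 1 - t))).sum :=
  (Finset.sum_range_reflect f m).symm

theorem pvE1 (bo : List (List Int)) (n i : Int) (h0 : 0 ≤ i) (h1 : i < n) :
    pvD1 bo n i = pvS1 bo n i := by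
  rw [pvD1_eq, PySem.List.pyRange_one_append 0 i n h0 (le_of_lt h1),
    List.map_append, List.sum_append]
  have hfirst : ((PySem.List.pyRange 0 i 1).map
      (fun r => if 0 ≤ r - i ∧ r - i < n then pvCellA bo r (r - i) else 0)).sum = 0 := by
    rw [List.map_congr_left (g := fun _ => (0:Int))
      (by intro r hr; obtain ⟨a, b⟩ := PySem.List.mem_pyRange_one.mp hr; rw [if_neg]; omega)]
    simp
  rw [hfirst, zero_add]
  rw [List.map_congr_left (g := fun r => pvCellA bo r (r - i))
    (by intro r hr; obtain ⟨a, b⟩ := PySem.List.mem_pyRange_one.mp hr; rw [if_pos]; omega)]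
  unfold pvS1
  rw [PySem.List.pyRange_one i n, PySem.List.pyRange_one 0 (n - i), List.map_map, List.map_map,
    sub_zero]
  congr 1
  apply List.map_congr_left
  intro t _ht
  simp only [Function.comp]
  exact pvCell_congr bo (by omega) (by omega)

theorem pvE2 (bo : List (List Int)) (n i : Int) (h0 : 0 ≤ i) (h1 : i < n) :
    pvD1 bo n (-i) = pvS2 bo n i := by
  rw [pvD1_eq, PySem.List.pyRange_one_append 0 (n - i) n (by omega) (by omega),
    List.map_append, List.sum_append]
  have hlast : ((PySem.List.pyRange (n - i) n 1).map
      (fun r => if 0 ≤ r - -i ∧ r - -i < n then pvCellA bo r (r - -i) else 0)).sum = 0 := by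
    rw [List.map_congr_left (g := fun _ => (0:Int))
      (by intro r hr; obtain ⟨a, b⟩ := PySem.List.mem_pyRange_one.mp hr; rw [if_neg]; omega)]
    simp
  rw [hlast, add_zero]
  rw [List.map_congr_left (g := fun r => pvCellA bo r (r + i))
    (by intro r hr; obtain ⟨a, b⟩ := PySem.List.mem_pyRange_one.mp hr
        rw [if_pos (by omega), show r - -i = r + i by ring])]
  unfold pvS2
  rw [PySem.List.pyRange_one 0 (n - i), List.map_map, List.map_map, sub_zero]
  congr 1
  apply List.map_congr_left
  intro t _ht
  simp only [Function.comp]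
  exact pvCell_congr bo (by omega) (by omega)

theorem pvE3 (bo : List (List Int)) (n i : Int) (h0 : 0 ≤ i) (h1 : i < n) :
    pvD2 bo n (n - 1 - i) = pvS3 bo n i := by
  rw [pvD2_eq, PySem.List.pyRange_one_append 0 (n - i) n (by omega) (by omega),
    List.map_append, List.sum_append]
  have hlast : ((PySem.List.pyRange (n - i) n 1).map
      (fun r => if 0 ≤ n - 1 - i - r ∧ n - 1 - i - r < n then pvCellA bo r (n - 1 - i - r) else 0)).sum = 0 := by
    rw [List.map_congr_left (g := fun _ => (0:Int))
      (by intro r hr; obtain ⟨a, b⟩ := PySem.List.mem_pyRange_one.mp hr; rw [if_neg]; omega)]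
    simp
  rw [hlast, add_zero]
  rw [List.map_congr_left (g := fun r => pvCellA bo r (n - 1 - i - r))
    (by intro r hr; obtain ⟨a, b⟩ := PySem.List.mem_pyRange_one.mp hr; rw [if_pos (by omega)])]
  unfold pvS3
  rw [PySem.List.pyRange_one 0 (n - i), List.map_map, List.map_map, sub_zero,
    pvSumReflect ((n - i).toNat)]
  congr 1
  apply List.map_congr_left
  intro t ht
  have htm := List.mem_range.mp ht
  simp only [Function.comp]
  exact pvCell_congr bo (by omega) (by omega)

theorem pvE4 (bo : List (List Int)) (n i : Int) (h0 : 0 ≤ i) (h1 : i < n) :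
    pvD2 bo n (n - 1 + i) = pvS4 bo n i := by
  rw [pvD2_eq, PySem.List.pyRange_one_append 0 i n h0 (le_of_lt h1),
    List.map_append, List.sum_append]
  have hfirst : ((PySem.List.pyRange 0 i 1).map
      (fun r => if 0 ≤ n - 1 + i - r ∧ n - 1 + i - r < n then pvCellA bo r (n - 1 + i - r) else 0)).sum = 0 := by
    rw [List.map_congr_left (g := fun _ => (0:Int))
      (by intro r hr; obtain ⟨a, b⟩ := PySem.List.mem_pyRange_one.mp hr; rw [if_neg]; omega)]
    simp
  rw [hfirst, zero_add]
  rw [List.map_congr_left (g := fun r => pvCellA bo r (n - 1 + i - r))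
    (by intro r hr; obtain ⟨a, b⟩ := PySem.List.mem_pyRange_one.mp hr; rw [if_pos (by omega)])]
  unfold pvS4
  rw [PySem.List.pyRange_one i n, PySem.List.pyRange_one 0 (n - i), List.map_map, List.map_map,
    sub_zero, pvSumReflect ((n - i).toNat)]
  congr 1
  apply List.map_congr_left
  intro t ht
  have htm := List.mem_range.mp ht
  simp only [Function.comp]
  exact pvCell_congr bo (by omega) (by omega)

theorem pvMemPairs (n : Int) (p : Int × Int) :
    p ∈ pvPairs n ↔ 0 ≤ p.1 ∧ p.1 < n ∧ 0 ≤ p.2 ∧ p.2 < n := by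
  simp only [pvPairs, List.mem_flatMap, List.mem_map, PySem.List.mem_pyRange_one]
  constructor
  · rintro ⟨r, hr, c, hc, rfl⟩
    exact ⟨hr.1, hr.2, hc.1, hc.2⟩
  · rintro ⟨h1, h2, h3, h4⟩
    exact ⟨p.1, ⟨h1, h2⟩, p.2, ⟨h3, h4⟩, rfl⟩

theorem A_eq_all (bo : List (List Int)) (n : Int) :
    CheckDiagonalSum bo n = true ↔
      ∀ i, 0 ≤ i → i < n →
        pvS1 bo n i ≤ 1 ∧ pvS2 bo n i ≤ 1 ∧ pvS3 bo n i ≤ 1 ∧ pvS4 bo n i ≤ 1 := by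
  unfold CheckDiagonalSum
  rw [pvLoopA_eq_all, List.all_eq_true]
  constructor
  · intro H i h0 h1
    have := H i (PySem.List.mem_pyRange_one.mpr ⟨h0, h1⟩)
    simp at this
    omega
  · intro H i hi
    obtain ⟨h0, h1⟩ := PySem.List.mem_pyRange_one.mp hi
    have := H i h0 h1
    simp
    omega

-- ===== VERDICT (by name: the statement is the Claim_ definition above) =====
theorem CheckDiagonalSum_spec : Claim_equal_CheckDiagonalSum := by
  intro bo n _dom _pre
  unfold Spec_CheckDiagonalSum
  rw [Bool.eq_iff_iff, A_eq_all, B_eq_all]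
  constructor
  · intro H
    constructor
    · intro k hk
      obtain ⟨p, hp, rfl⟩ := List.mem_map.mp hk
      obtain ⟨hr0, hr1, hc0, hc1⟩ := (pvMemPairs n p).mp hp
      by_cases hk0 : 0 ≤ p.1 - p.2
      · rw [pvE1 bo n (p.1 - p.2) hk0 (by omega)]
        exact (H (p.1 - p.2) hk0 (by omega)).1
      · rw [show p.1 - p.2 = -(p.2 - p.1) by ring,
          pvE2 bo n (p.2 - p.1) (by omega) (by omega)]
        exact (H (p.2 - p.1) (by omega) (by omega)).2.1
    · intro k hk
      obtain ⟨p, hp, rfl⟩ := List.mem_map.mp hk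
      obtain ⟨hr0, hr1, hc0, hc1⟩ := (pvMemPairs n p).mp hp
      by_cases hks : p.1 + p.2 ≤ n - 1
      · rw [show p.1 + p.2 = n - 1 - (n - 1 - (p.1 + p.2)) by ring,
          pvE3 bo n (n - 1 - (p.1 + p.2)) (by omega) (by omega)]
        exact (H (n - 1 - (p.1 + p.2)) (by omega) (by omega)).2.2.1
      · rw [show p.1 + p.2 = n - 1 + (p.1 + p.2 - (n - 1)) by ring,
          pvE4 bo n (p.1 + p.2 - (n - 1)) (by omega) (by omega)]
        exact (H (p.1 + p.2 - (n - 1)) (by omega) (by omega)).2.2.2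
  · rintro ⟨H1, H2⟩ i h0 h1
    refine ⟨?_, ?_, ?_, ?_⟩
    · rw [← pvE1 bo n i h0 h1]
      exact H1 _ (List.mem_map.mpr ⟨(i, 0), (pvMemPairs n _).mpr ⟨h0, h1, le_refl 0, by omega⟩, by simp⟩)
    · rw [← pvE2 bo n i h0 h1]
      exact H1 _ (List.mem_map.mpr ⟨(0, i), (pvMemPairs n _).mpr ⟨le_refl 0, by omega, h0, h1⟩, by simp⟩)
    · rw [← pvE3 bo n i h0 h1]
      exact H2 _ (List.mem_map.mpr ⟨(n - 1 - i, 0), (pvMemPairs n _).mpr ⟨by omega, by omega, le_refl 0, by omega⟩, by simp⟩)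
    · rw [← pvE4 bo n i h0 h1]
      exact H2 _ (List.mem_map.mpr ⟨(n - 1, i), (pvMemPairs n _).mpr ⟨by omega, by omega, h0, h1⟩, by simp⟩)
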